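-- pv_equiv track=rewrite | github.com/baris5d/Space-Cakes | Medium/Elementary-Cellular-Automaton/automation.py | icon_translation
-- ===== SOURCE A (Python) =====
-- def obtain_bit(number,pos):
--         bit=(number&pow(2,pos))>>pos
--         return bit
--
-- def icon_translation(seq,tam):
--     chain="-"
--     for i in range(tam-1,-1,-1):
--         if obtain_bit(seq,i)==1:
--             chain=chain+'*'
--         else:
--             chain=chain+' '
--     chain=chain+'-'
--     return chain
-- ===== SOURCE B (Python) =====
-- def icon_translation(seq, tam):
--     if tam <= 0:
--         return '--'
--     masked = seq & ((1 << tam) - 1)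
--     bits = format(masked, '0{}b'.format(tam))
--     return '-' + bits.translate(str.maketrans('10', '* ')) + '-'
-- ===== Notes on version B (the rewrite author's own statement) =====
-- stated objective: faster
-- what changed: B masks the low tam bits once and treats the rendering as staged string processing: format() produces a zero-padded binary string and translate() maps '1'->'*' and '0'->' ', replacing A's explicit loop that extracts each bit with pow/and/shift.
import Mathlib
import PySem

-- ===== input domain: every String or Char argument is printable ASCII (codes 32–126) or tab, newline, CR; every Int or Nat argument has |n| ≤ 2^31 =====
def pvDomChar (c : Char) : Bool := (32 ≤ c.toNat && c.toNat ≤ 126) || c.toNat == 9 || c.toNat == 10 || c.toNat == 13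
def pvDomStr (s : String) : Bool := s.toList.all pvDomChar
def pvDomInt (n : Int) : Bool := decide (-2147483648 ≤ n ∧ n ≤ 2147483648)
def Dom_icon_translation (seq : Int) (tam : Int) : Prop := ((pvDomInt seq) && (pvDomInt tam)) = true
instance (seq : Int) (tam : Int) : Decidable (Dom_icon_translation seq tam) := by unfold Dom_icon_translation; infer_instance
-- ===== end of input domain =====

-- B renders the bits by staged string processing — mask once, format the masked value as a
-- zero-padded binary string, translate '1'->'*' and '0'->' ' — instead of A's per-bit
-- pow/and/shift extraction loop (objective: faster, staged formatting instead of a per-bit extraction loop).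


-- ===== PORT A =====
-- pow(2,pos) and >> pos ported with pos.toNat: exact for pos ≥ 0, which holds at every
-- call site (the loop runs pos from tam-1 down to 0).
def obtainBit (number : Int) (pos : Int) : Int :=
  (PySem.Int.band number ((2 : Int) ^ pos.toNat)) >>> pos.toNat

def icon_translation (seq : Int) (tam : Int) : String :=
  let chain := "-"
  let chain := (PySem.List.pyRange (tam - 1) (-1) (-1)).foldl
      (fun chain i => if obtainBit seq i == 1 then chain ++ "*" else chain ++ " ") chain
  chain ++ "-"

-- ===== PORT B =====
-- hand-written port of Python's format(n, 'b'): binary digits of n without leading zeros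
-- ('0' for n = 0); exact for n ≥ 0, the only way B calls it (masked is nonnegative).
def binCore : Nat → List Char
  | 0 => []
  | n + 1 => binCore ((n + 1) / 2) ++ [if (n + 1) % 2 = 1 then '1' else '0']
decreasing_by exact Nat.div_lt_self (Nat.succ_pos n) (by norm_num)

def binStr (n : Nat) : List Char := if n = 0 then ['0'] else binCore n

-- format(n, '0{w}b'): left-pad with '0' to width w
def pyFormatBin (n w : Nat) : List Char :=
  List.replicate (w - (binStr n).length) '0' ++ binStr n

-- translate(str.maketrans('10', '* '))
def trChar (c : Char) : Char := if c = '1' then '*' else if c = '0' then ' ' else c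

def icon_translation_alt (seq : Int) (tam : Int) : String :=
  if tam ≤ 0 then "--"
  else
    let masked := PySem.Int.band seq (((1 : Int) <<< tam.toNat) - 1)
    let bits := pyFormatBin masked.toNat tam.toNat
    "-" ++ String.ofList (bits.map trChar) ++ "-"

-- ===== PRECONDITION & SPEC =====
def Spec_icon_translation (seq : Int) (tam : Int) (out : String) : Prop := out = icon_translation_alt seq tam
instance (seq : Int) (tam : Int) (out : String) : Decidable (Spec_icon_translation seq tam out) := by unfold Spec_icon_translation; infer_instance

-- ===== CLAIM (what is proved, stated in full; the proofs are below) =====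
def Claim_equal_icon_translation : Prop := ∀ (seq : Int) (tam : Int), Dom_icon_translation seq tam → Spec_icon_translation seq tam (icon_translation seq tam)

-- ===== LEMMAS AND PROOFS =====

-- the j-th bit of the infinite two's-complement representation of a, as Python sees it
def pyBit (a : Int) (j : Nat) : Bool :=
  if 0 ≤ a then a.toNat.testBit j else !((-a - 1).toNat.testBit j)

def bitChar (b : Bool) : Char := if b then '*' else ' '

def bitStr (b : Bool) : String := if b then "*" else " "

-- chars of bits t-1, t-2, …, 0 (most significant of the window first)
def midList (f : Nat → Bool) (t : Nat) : List Char := (List.range t).reverse.map (fun k => bitChar (f k))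

-- binary digits of bits t-1, …, 0 of v
def bitsList (v t : Nat) : List Char :=
  (List.range t).reverse.map (fun k => if v.testBit k then '1' else '0')

lemma bitStr_eq_ofList (b : Bool) : bitStr b = String.ofList [bitChar b] := by
  cases b <;> rfl

lemma ofList_cons (c : Char) (l : List Char) :
    String.ofList (c :: l) = String.ofList [c] ++ String.ofList l := by
  apply String.toList_inj.mp; simp

lemma compl_testBit (t x j : Nat) (hx : x < 2 ^ t) (hj : j < t) :
    (2 ^ t - 1 - x).testBit j = !x.testBit j := by
  induction t generalizing x j with
  | zero => omega
  | succ t ih =>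
      cases j with
      | zero =>
          have h2 : (2 ^ (t + 1) - 1 - x) % 2 = 1 - x % 2 := by
            rw [pow_succ] at hx ⊢; omega
          by_cases hx2 : x % 2 = 1 <;>
            simp [Nat.testBit_zero, h2, hx2] <;> omega
      | succ j =>
          rw [Nat.testBit_succ, Nat.testBit_succ]
          have hdiv : (2 ^ (t + 1) - 1 - x) / 2 = 2 ^ t - 1 - x / 2 := by
            rw [pow_succ] at hx ⊢; omega
          rw [hdiv]
          exact ih (x / 2) j (by rw [pow_succ] at hx; omega) (by omega)

lemma two_pow_int_cast (j : Nat) : ((2 : Int) ^ j) = ((2 ^ j : Nat) : Int) := by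
  push_cast; ring

lemma obtainBit_eq (a : Int) (j : Nat) :
    obtainBit a (j : Int) = if pyBit a j then 1 else 0 := by
  unfold obtainBit pyBit
  rw [Int.toNat_natCast]
  by_cases ha : 0 ≤ a
  · obtain ⟨m, rfl⟩ := Int.eq_ofNat_of_zero_le ha
    rw [if_pos ha, Int.toNat_natCast, two_pow_int_cast, PySem.Int.band_natCast,
      Nat.and_two_pow, ← Int.natCast_shiftRight, Nat.shiftRight_eq_div_pow,
      Nat.mul_div_cancel _ (Nat.two_pow_pos j)]
    cases m.testBit j <;> simp
  · rw [if_neg ha]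
    have hb : (0 : Int) ≤ (2 : Int) ^ j := by positivity
    have hval : PySem.Int.band a ((2 : Int) ^ j)
        = (((2 ^ j : Nat) - (((-a - 1).toNat).testBit j).toNat * 2 ^ j : Nat) : Int) := by
      simp only [PySem.Int.band, if_neg ha, if_pos hb]
      rw [show ((2:Int)^j).toNat = 2 ^ j by rw [two_pow_int_cast, Int.toNat_natCast],
        Nat.and_comm, Nat.and_two_pow]
    rw [hval, ← Int.natCast_shiftRight]
    cases hbit : ((-a - 1).toNat).testBit j
    · simp only [Bool.toNat_false, Nat.zero_mul, Nat.sub_zero, Nat.shiftRight_eq_div_pow,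
        Nat.div_self (Nat.two_pow_pos j)]
      simp
    · simp [Nat.shiftRight_eq_div_pow]

lemma mask_testBit (a : Int) (t : Nat) :
    ∃ v : Nat, PySem.Int.band a (((1 : Int) <<< t) - 1) = (v : Int) ∧
      ∀ j : Nat, v.testBit j = (decide (j < t) && pyBit a j) := by
  have hmk : ((1 : Int) <<< t) - 1 = ((2 ^ t - 1 : Nat) : Int) := by
    rw [show (1 : Int) <<< t = 2 ^ t by simp [Int.shiftLeft_eq], two_pow_int_cast]
    push_cast [Nat.one_le_two_pow]
    ring
  rw [hmk]
  by_cases ha : 0 ≤ a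
  · obtain ⟨m, rfl⟩ := Int.eq_ofNat_of_zero_le ha
    refine ⟨m % 2 ^ t, ?_, ?_⟩
    · rw [PySem.Int.band_natCast, Nat.and_two_pow_sub_one_eq_mod]
    · intro j
      rw [Nat.testBit_mod_two_pow]
      unfold pyBit
      rw [if_pos ha, Int.toNat_natCast]
  · set m := (-a - 1).toNat with hm
    refine ⟨2 ^ t - 1 - m % 2 ^ t, ?_, ?_⟩
    · have hb : (0 : Int) ≤ ((2 ^ t - 1 : Nat) : Int) := by positivity
      simp only [PySem.Int.band, if_neg ha, if_pos hb, Int.toNat_natCast]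
      rw [Nat.and_comm, Nat.and_two_pow_sub_one_eq_mod, ← hm]
    · intro j
      unfold pyBit
      rw [if_neg ha, ← hm]
      by_cases hj : j < t
      · rw [compl_testBit t (m % 2 ^ t) j (Nat.mod_lt _ (Nat.two_pow_pos t)) hj,
          Nat.testBit_mod_two_pow, decide_eq_true hj]
        simp
      · have hvlt : 2 ^ t - 1 - m % 2 ^ t < 2 ^ j :=
          lt_of_lt_of_le (by have := Nat.two_pow_pos t; omega)
            (Nat.pow_le_pow_right (by norm_num) (Nat.le_of_not_lt hj))
        rw [Nat.testBit_lt_two_pow hvlt]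
        simp [hj]

lemma rev_range (t : Nat) : (List.range t).reverse = (List.range t).map (fun k => t - 1 - k) := by
  induction t with
  | zero => rfl
  | succ t ih =>
      conv_lhs => rw [List.range_succ]
      conv_rhs => rw [List.range_succ_eq_map]
      simp only [List.reverse_append, List.reverse_cons, List.reverse_nil, List.nil_append,
        List.singleton_append, List.map_cons, List.map_map, ih, Nat.add_sub_cancel, Nat.sub_zero]
      congr 1
      exact List.map_congr_left (fun k _ => by simp [Function.comp]; omega)

def strCat : List String → String
  | [] => ""
  | x :: xs => x ++ strCat xs

lemma foldl_str_append {α : Type} (g : α → String) (l : List α) (s : String) :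
    l.foldl (fun ch k => ch ++ g k) s = s ++ strCat (l.map g) := by
  induction l generalizing s with
  | nil => simp [strCat]
  | cons a l ih => simp [strCat, ih, String.append_assoc]

lemma strCat_singletons (l : List Bool) :
    strCat (l.map bitStr) = String.ofList (l.map bitChar) := by
  induction l with
  | nil => simp [strCat]
  | cons b l ih =>
      simp only [List.map_cons, strCat, ih, bitStr_eq_ofList]
      rw [← ofList_cons]

lemma a_loop (seq : Int) (t : Nat) :
    (PySem.List.pyRange ((t : Int) - 1) (-1) (-1)).foldl
        (fun chain i => if obtainBit seq i == 1 then chain ++ "*" else chain ++ " ") "-"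
      = "-" ++ String.ofList (midList (pyBit seq) t) := by
  rw [PySem.List.pyRange_neg_one,
    show ((t : Int) - 1 - -1).toNat = t by omega, List.foldl_map]
  have hcong : (List.range t).foldl
      (fun chain k => if obtainBit seq ((t : Int) - 1 - (k : Nat)) == 1
        then chain ++ "*" else chain ++ " ") "-"
      = (List.range t).foldl (fun chain k => chain ++ bitStr (pyBit seq (t - 1 - k))) "-" := by
    apply PySem.List.foldl_congr_mem
    intro acc k hk
    have hk' : k < t := List.mem_range.mp hk
    rw [show ((t : Int) - 1 - (k : Nat)) = ((t - 1 - k : Nat) : Int) by omega,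
      obtainBit_eq seq (t - 1 - k)]
    cases hb : pyBit seq (t - 1 - k) <;> simp [bitStr]
  rw [hcong, foldl_str_append]
  congr 1
  have h1 := strCat_singletons ((List.range t).map (fun k => pyBit seq (t - 1 - k)))
  rw [List.map_map, List.map_map] at h1
  unfold midList
  rw [rev_range, List.map_map]
  simp only [Function.comp_def] at h1 ⊢
  exact h1

-- ===== B-side lemmas =====

lemma bitsList_succ (v t : Nat) :
    bitsList v (t + 1) = (if v.testBit t then '1' else '0') :: bitsList v t := by
  unfold bitsList
  rw [List.range_succ, List.reverse_append]
  rfl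

lemma bitsList_zero_val (t : Nat) : bitsList 0 t = List.replicate t '0' := by
  induction t with
  | zero => rfl
  | succ t ih => rw [bitsList_succ, ih]; simp [List.replicate_succ]

lemma bitsList_length (v t : Nat) : (bitsList v t).length = t := by
  simp [bitsList]

lemma bitsList_pad (v u t : Nat) (hut : u ≤ t) (hv : v < 2 ^ u) :
    bitsList v t = List.replicate (t - u) '0' ++ bitsList v u := by
  induction t with
  | zero =>
      rw [Nat.le_zero.mp hut]
      rfl
  | succ t ih =>
      by_cases h : u = t + 1
      · subst h; simp
      · have hut' : u ≤ t := by omega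
        have htb : v.testBit t = false :=
          Nat.testBit_lt_two_pow (lt_of_lt_of_le hv (Nat.pow_le_pow_right (by norm_num) hut'))
        rw [bitsList_succ, htb, ih hut',
          show t + 1 - u = (t - u) + 1 by omega, List.replicate_succ]
        simp

lemma binCore_succ_unfold (n : Nat) :
    binCore (n + 1) = binCore ((n + 1) / 2) ++ [if (n + 1) % 2 = 1 then '1' else '0'] := by
  rw [binCore]

lemma binCore_eq (t : Nat) : ∀ v : Nat, 2 ^ t ≤ v → v < 2 ^ (t + 1) → binCore v = bitsList v (t + 1) := by
  induction t with
  | zero =>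
      intro v h1 h2
      have hv1 : v = 1 := by omega
      subst hv1
      rw [show (1 : Nat) = 0 + 1 from rfl, binCore_succ_unfold]
      norm_num
      rw [show binCore 0 = [] from by rw [binCore]]
      rfl
  | succ t ih =>
      intro v h1 h2
      obtain ⟨n, rfl⟩ : ∃ n, v = n + 1 := ⟨v - 1, by have := Nat.one_le_two_pow (n := t + 1); omega⟩
      rw [binCore_succ_unfold]
      have hdiv1 : 2 ^ t ≤ (n + 1) / 2 := by
        rw [pow_succ] at h1; omega
      have hdiv2 : (n + 1) / 2 < 2 ^ (t + 1) := by
        rw [pow_succ] at h2; omega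
      rw [ih _ hdiv1 hdiv2]
      -- bitsList (n+1) (t+2) = bitsList ((n+1)/2) (t+1) ++ [digit of bit 0]
      have hmain : bitsList (n + 1) (t + 1 + 1)
          = bitsList ((n + 1) / 2) (t + 1) ++ [if (n + 1) % 2 = 1 then '1' else '0'] := by
        unfold bitsList
        rw [List.range_succ_eq_map]
        simp only [List.reverse_cons, List.map_append, List.map_reverse, List.map_map]
        congr 1
        · congr 1
          apply List.map_congr_left
          intro k _
          simp only [Function.comp]
          rw [Nat.testBit_succ]
        · simp [Nat.testBit_zero]
      exact hmain.symm

lemma binStr_pad (v t : Nat) (ht : 1 ≤ t) (hv : v < 2 ^ t) :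
    List.replicate (t - (binStr v).length) '0' ++ binStr v = bitsList v t := by
  by_cases h0 : v = 0
  · subst h0
    unfold binStr
    rw [if_pos rfl, bitsList_zero_val]
    have : List.replicate (t - 1) '0' ++ ['0'] = List.replicate ((t - 1) + 1) '0' := by
      rw [List.replicate_succ']
    rw [show (['0'] : List Char).length = 1 from rfl, this, show (t - 1) + 1 = t by omega]
  · set s := Nat.log2 v with hs
    have h1 : 2 ^ s ≤ v := Nat.log2_self_le h0
    have h2 : v < 2 ^ (s + 1) := Nat.lt_log2_self
    have hbc : binCore v = bitsList v (s + 1) := binCore_eq s v h1 h2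
    have hst : s + 1 ≤ t := by
      have : 2 ^ s < 2 ^ t := lt_of_le_of_lt h1 hv
      have := (Nat.pow_lt_pow_iff_right (a := 2) (by norm_num)).mp this
      omega
    unfold binStr
    rw [if_neg h0, hbc, bitsList_length]
    exact (bitsList_pad v (s + 1) t hst h2).symm

lemma tr_bits (v t : Nat) : (bitsList v t).map trChar = midList v.testBit t := by
  unfold bitsList midList
  rw [List.map_map]
  apply List.map_congr_left
  intro k _
  simp only [Function.comp]
  cases v.testBit k <;> rfl

-- ===== VERDICT (by name: the statement is the Claim_ definition above) =====
theorem icon_translation_spec : Claim_equal_icon_translation := by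
  intro seq tam _
  unfold Spec_icon_translation
  simp only [icon_translation, icon_translation_alt]
  by_cases h : tam ≤ 0
  · rw [if_pos h]
    have hnil : PySem.List.pyRange (tam - 1) (-1) (-1) = [] := by
      rw [PySem.List.pyRange_neg_one, show (tam - 1 - -1).toNat = 0 by omega]
      rfl
    rw [hnil]
    rfl
  · rw [if_neg h]
    have htam : tam = (tam.toNat : Int) := by omega
    set t := tam.toNat with ht
    have ht1 : 1 ≤ t := by omega
    obtain ⟨v, hv, hbits⟩ := mask_testBit seq t
    have hveq : v = v % 2 ^ t := by
      apply Nat.eq_of_testBit_eq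
      intro j
      rw [Nat.testBit_mod_two_pow, hbits j]
      by_cases hj : j < t
      · simp [hj]
      · simp [hj]
    have hvlt : v < 2 ^ t := hveq ▸ Nat.mod_lt _ (Nat.two_pow_pos t)
    conv_lhs => rw [htam]
    rw [a_loop seq t, hv, Int.toNat_natCast]
    unfold pyFormatBin
    rw [binStr_pad v t ht1 hvlt, tr_bits]
    have hmid : midList (pyBit seq) t = midList v.testBit t := by
      unfold midList
      apply List.map_congr_left
      intro k hk
      have hk' : k < t := by simpa using List.mem_reverse.mp hk
      rw [hbits k, decide_eq_true hk']
      simp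
    rw [hmid]
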